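-- pv_equiv track=rewrite | github.com/world1tree/E2E-MSA | prepare_data.py | _get_label
-- ===== SOURCE A (Python) =====
-- def _get_label(align_seq):
--     gap_num = align_seq.count('-')
--     seq_label = list()
--     num = 0
--     for ch in align_seq:
--         if ch == '-':
--             num += 1
--         else:
--             seq_label.append(num)
--             num = 0
--     seq_label.append(num) # use </s> as virtual token.
--     label_str = ','.join(map(str, seq_label))
--     label_num = len(seq_label)
--     return label_str, label_num
-- ===== SOURCE B (Python) =====
-- def _get_label(align_seq):
--     n = len(align_seq)
--     bounds = [-1] + [i for i, ch in enumerate(align_seq) if ch != '-'] + [n]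
--     seq_label = [b - a - 1 for a, b in zip(bounds, bounds[1:])]
--     return ','.join(map(str, seq_label)), len(seq_label)
-- ===== Notes on version B (the rewrite author's own statement) =====
-- stated objective: alternative
-- what changed: B records the indices of the non-gap characters and obtains each gap-run length as the difference of consecutive sentinel-padded indices, instead of A's incremental counter that is flushed at every non-gap character.
import Mathlib
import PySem

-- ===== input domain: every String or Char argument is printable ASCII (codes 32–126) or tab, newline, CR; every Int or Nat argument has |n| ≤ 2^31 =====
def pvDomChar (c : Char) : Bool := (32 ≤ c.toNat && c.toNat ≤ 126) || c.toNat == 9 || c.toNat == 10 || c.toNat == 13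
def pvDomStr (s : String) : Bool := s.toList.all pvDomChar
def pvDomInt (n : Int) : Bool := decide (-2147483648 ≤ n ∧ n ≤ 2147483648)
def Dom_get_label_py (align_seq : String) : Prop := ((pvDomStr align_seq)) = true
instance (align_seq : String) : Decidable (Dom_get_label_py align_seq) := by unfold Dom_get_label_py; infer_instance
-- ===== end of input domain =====

-- B replaces A's flushed gap counter by index arithmetic on the positions of the
-- non-gap characters (alternative decomposition, same cost).

-- ===== PORT A =====
def get_label_py (align_seq : String) : String × Int :=
  let _gap_num : Nat := PySem.Str.count align_seq "-"
  let st := align_seq.toList.foldl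
      (fun (st : List Int × Int) ch =>
        if ch = '-' then (st.1, st.2 + 1) else (st.1 ++ [st.2], 0))
      (([] : List Int), (0 : Int))
  let seq_label := st.1 ++ [st.2]
  let label_str := PySem.Str.join "," (seq_label.map PySem.Int.toStr)
  let label_num : Int := seq_label.length
  (label_str, label_num)

-- ===== PORT B =====
def get_label_py_alt (align_seq : String) : String × Int :=
  let n : Int := align_seq.toList.length
  let bounds : List Int :=
    -1 :: ((PySem.List.enumerate align_seq.toList 0).filterMap
        (fun p => if p.2 ≠ '-' then some p.1 else none) ++ [n])
  let seq_label := (List.zip bounds (bounds.drop 1)).map (fun q => q.2 - q.1 - 1)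
  (PySem.Str.join "," (seq_label.map PySem.Int.toStr), (seq_label.length : Int))

-- ===== PRECONDITION & SPEC =====
def Spec_get_label_py (align_seq : String) (out : String × Int) : Prop := out = get_label_py_alt align_seq
instance (align_seq : String) (out : String × Int) : Decidable (Spec_get_label_py align_seq out) := by unfold Spec_get_label_py; infer_instance

-- ===== CLAIM (what is proved, stated in full; the proofs are below) =====
def Claim_equal_get_label_py : Prop := ∀ (align_seq : String), Dom_get_label_py align_seq → Spec_get_label_py align_seq (get_label_py align_seq)

-- ===== LEMMAS AND PROOFS =====

/-- Add `k` to the head of a list (`[k]` if empty). -/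
def gAdd (k : Int) : List Int → List Int
  | [] => [k]
  | h :: t => (k + h) :: t

/-- The common specification: the gap-run lengths of the string, including the
leading and trailing (possibly empty) runs. -/
def gSpec : List Char → List Int
  | [] => [0]
  | c :: t => if c = '-' then gAdd 1 (gSpec t) else 0 :: gSpec t

lemma gAdd_cons (k h : Int) (t : List Int) : gAdd k (h :: t) = (k + h) :: t := rfl

lemma gAdd_gAdd (a b : Int) (x : List Int) : gAdd a (gAdd b x) = gAdd (a + b) x := by
  cases x <;> simp [gAdd, add_assoc]

lemma gSpec_ne_nil (l : List Char) : gSpec l ≠ [] := by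
  cases l with
  | nil => simp [gSpec]
  | cons c t =>
    simp only [gSpec]
    split
    · cases h : gSpec t <;> simp [gAdd]
    · simp

lemma gAdd_zero (x : List Int) (h : x ≠ []) : gAdd 0 x = x := by
  cases x with
  | nil => exact absurd rfl h
  | cons a t => simp [gAdd]

/-- A's loop: the flushed prefix plus the pending counter realises `gSpec`. -/
lemma foldA (l : List Char) : ∀ (pre : List Int) (k : Int),
    (l.foldl (fun (st : List Int × Int) ch =>
        if ch = '-' then (st.1, st.2 + 1) else (st.1 ++ [st.2], 0)) (pre, k)).1
      ++ [(l.foldl (fun (st : List Int × Int) ch =>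
        if ch = '-' then (st.1, st.2 + 1) else (st.1 ++ [st.2], 0)) (pre, k)).2]
    = pre ++ gAdd k (gSpec l) := by
  induction l with
  | nil => intro pre k; simp [gSpec, gAdd]
  | cons c t ih =>
    intro pre k
    by_cases hc : c = '-'
    · simp only [List.foldl_cons]
      rw [if_pos hc, ih pre (k + 1), gSpec, if_pos hc, gAdd_gAdd]
    · simp only [List.foldl_cons, if_neg hc]
      rw [ih (pre ++ [k]) 0, gAdd_zero _ (gSpec_ne_nil t), gSpec, if_neg hc,
        gAdd_cons, add_zero, List.append_assoc]
      rfl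

/-- Adjacent differences of a bounds list. -/
def zd (b : List Int) : List Int := (List.zip b (b.drop 1)).map (fun q => q.2 - q.1 - 1)

/-- Non-gap positions of `l` when its first character has index `i`. -/
def posF (i : Int) : List Char → List Int
  | [] => []
  | c :: t => if c ≠ '-' then i :: posF (i + 1) t else posF (i + 1) t

lemma posF_eq_filterMap (l : List Char) : ∀ i : Int,
    (PySem.List.enumerate l i).filterMap
      (fun p => if p.2 ≠ '-' then some p.1 else none) = posF i l := by
  induction l with
  | nil => intro i; simp [PySem.List.enumerate_nil, posF]
  | cons c t ih =>
    intro i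
    have h := ih (i + 1)
    simp only [ne_eq, ite_not] at h
    by_cases hc : c = '-' <;>
      simp [PySem.List.enumerate_cons, hc, posF, h]

lemma zd_cons₂ (p x : Int) (rest : List Int) :
    zd (p :: x :: rest) = (x - p - 1) :: zd (x :: rest) := by
  simp [zd]

/-- B's adjacent differences over the sentinel-padded positions realise `gSpec`. -/
lemma zdB (l : List Char) : ∀ (i p : Int),
    zd (p :: (posF i l ++ [i + l.length])) = gAdd (i - p - 1) (gSpec l) := by
  induction l with
  | nil => intro i p; simp [posF, zd, gSpec, gAdd]
  | cons c t ih =>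
    intro i p
    have hlen : (i : Int) + (c :: t).length = (i + 1) + t.length := by
      simp [List.length_cons]; ring
    by_cases hc : c = '-'
    · rw [posF, if_neg (by simp [hc]), hlen, ih (i + 1) p, gSpec, if_pos hc,
        gAdd_gAdd]
      congr 1
      ring
    · rw [posF, if_pos (by simp [hc]), List.cons_append, hlen, zd_cons₂,
        ih (i + 1) i, gSpec, if_neg hc]
      have h0 : (i : Int) + 1 - i - 1 = 0 := by ring
      rw [h0, gAdd_zero _ (gSpec_ne_nil t), gAdd_cons, add_zero]

/-- The two label lists coincide. -/
lemma lists_eq (l : List Char) :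
    (l.foldl (fun (st : List Int × Int) ch =>
        if ch = '-' then (st.1, st.2 + 1) else (st.1 ++ [st.2], 0)) ([], 0)).1
      ++ [(l.foldl (fun (st : List Int × Int) ch =>
        if ch = '-' then (st.1, st.2 + 1) else (st.1 ++ [st.2], 0)) ([], 0)).2]
    = (List.zip
        (-1 :: ((PySem.List.enumerate l 0).filterMap
            (fun p => if p.2 ≠ '-' then some p.1 else none) ++ [(l.length : Int)]))
        ((-1 :: ((PySem.List.enumerate l 0).filterMap
            (fun p => if p.2 ≠ '-' then some p.1 else none) ++ [(l.length : Int)])).drop 1)).map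
        (fun q => q.2 - q.1 - 1) := by
  rw [foldA l [] 0, gAdd_zero _ (gSpec_ne_nil l), List.nil_append,
    posF_eq_filterMap l 0]
  have hB := zdB l 0 (-1)
  have h0 : ((0 : Int) - (-1) - 1) = 0 := by ring
  have hz : ((0 : Int) + l.length) = (l.length : Int) := by ring
  rw [h0, hz, gAdd_zero _ (gSpec_ne_nil l)] at hB
  unfold zd at hB
  exact hB.symm

-- ===== VERDICT (by name: the statement is the Claim_ definition above) =====
theorem get_label_py_spec : Claim_equal_get_label_py := by
  intro s _
  unfold Spec_get_label_py get_label_py get_label_py_alt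
  simp only [lists_eq]
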